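-- pv_equiv track=rewrite | github.com/Rai220/anima | generation_19/verse_compare.py | count_syllables_en
-- ===== SOURCE A (Python) =====
-- EN_VOWELS = set("aeiouy")
--
-- def count_syllables_en(word: str) -> int:
--     """Грубый подсчёт слогов в английском слове."""
--     word = word.lower().strip()
--     if not word:
--         return 0
--     count = 0
--     prev_vowel = False
--     for ch in word:
--         is_vowel = ch in EN_VOWELS
--         if is_vowel and not prev_vowel:
--             count += 1
--         prev_vowel = is_vowel
--     # Немое e в конце
--     if word.endswith("e") and count > 1:
--         count -= 1
--     # Минимум 1 слог
--     return max(count, 1)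
-- ===== SOURCE B (Python) =====
-- def count_syllables_en(word: str) -> int:
--     """Грубый подсчёт слогов в английском слове."""
--     w = word.lower().strip()
--     if not w:
--         return 0
--     marked = "".join(c if c in "aeiouy" else " " for c in w)
--     count = len(marked.split())
--     if w.endswith("e") and count > 1:
--         count -= 1
--     return max(count, 1)
-- ===== Notes on version B (the rewrite author's own statement) =====
-- stated objective: idiomatic
-- what changed: Replaces the prev_vowel state-machine loop with staged passes: blank out every non-vowel character, then let str.split() extract the maximal vowel runs and take the number of pieces; same silent-e and max tail.
import Mathlib
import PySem

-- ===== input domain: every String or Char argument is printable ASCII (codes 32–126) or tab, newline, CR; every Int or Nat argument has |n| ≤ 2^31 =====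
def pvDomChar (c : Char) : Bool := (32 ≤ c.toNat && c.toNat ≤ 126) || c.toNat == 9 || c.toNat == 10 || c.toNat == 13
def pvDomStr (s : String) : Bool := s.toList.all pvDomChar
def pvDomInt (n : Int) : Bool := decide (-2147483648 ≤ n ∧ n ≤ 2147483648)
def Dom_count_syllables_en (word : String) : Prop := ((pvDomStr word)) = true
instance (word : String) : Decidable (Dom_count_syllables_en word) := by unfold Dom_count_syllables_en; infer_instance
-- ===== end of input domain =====

-- B replaces A's prev_vowel state-machine loop with staged passes: blank out non-vowels, then count the pieces str.split() extracts (idiomatic); same result.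

-- ===== PORT A =====
-- EN_VOWELS = set("aeiouy")
def EN_VOWELS : List Char := PySem.Set.ofList "aeiouy".toList

def count_syllables_en (word : String) : Int :=
  let w := PySem.Chars.strip (PySem.Chars.lower word.toList)
  if w = [] then 0
  else
    let r := w.foldl (fun (s : Int × Bool) ch =>
      let is_vowel := EN_VOWELS.contains ch
      ((if is_vowel && !s.2 then s.1 + 1 else s.1), is_vowel)) (0, false)
    let c := if PySem.Chars.endswith w "e".toList && decide (r.1 > 1) then r.1 - 1 else r.1
    max c 1

-- ===== PORT B =====
-- c in "aeiouy"
def bIsV (c : Char) : Bool := "aeiouy".toList.contains c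

def count_syllables_en_alt (word : String) : Int :=
  let w := PySem.Chars.strip (PySem.Chars.lower word.toList)
  if w = [] then 0
  else
    -- marked = "".join(c if c in "aeiouy" else " " for c in w)
    let marked := w.map (fun c => if bIsV c then c else ' ')
    -- count = len(marked.split())
    let count : Int := (PySem.Chars.split₀ marked).length
    let count := if PySem.Chars.endswith w "e".toList && decide (count > 1) then count - 1 else count
    max count 1

-- ===== PRECONDITION & SPEC =====
def Spec_count_syllables_en (word : String) (out : Int) : Prop := out = count_syllables_en_alt word
instance (word : String) (out : Int) : Decidable (Spec_count_syllables_en word out) := by unfold Spec_count_syllables_en; infer_instance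

-- ===== CLAIM (what is proved, stated in full; the proofs are below) =====
def Claim_equal_count_syllables_en : Prop := ∀ (word : String), Dom_count_syllables_en word → Spec_count_syllables_en word (count_syllables_en word)

-- ===== LEMMAS AND PROOFS =====

lemma vowels_eq : EN_VOWELS = "aeiouy".toList := by decide

-- number of vowel groups in l, given whether the previous char was a vowel
def natGroups (p : Bool) : List Char → Nat
  | [] => 0
  | c :: t => (if bIsV c && !p then 1 else 0) + natGroups (bIsV c) t

-- A's fold computes natGroups
lemma foldl_eq_groups (l : List Char) : ∀ (c : Int) (p : Bool),
    (l.foldl (fun (s : Int × Bool) ch =>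
      let is_vowel := EN_VOWELS.contains ch
      ((if is_vowel && !s.2 then s.1 + 1 else s.1), is_vowel)) (c, p)).1 = c + natGroups p l := by
  induction l with
  | nil => intro c p; simp [natGroups]
  | cons h t ih =>
      intro c p
      have hv : EN_VOWELS.contains h = bIsV h := by rw [vowels_eq]; rfl
      simp only [List.foldl_cons, ih, hv]
      cases hvb : bIsV h <;> cases p <;> first
        | (simp [natGroups, hvb]; ring)
        | simp [natGroups, hvb]

lemma isspace_of_vowel (c : Char) (h : bIsV c = true) : PySem.Chars.isspace c = false := by
  simp [bIsV, List.contains_eq_mem] at h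
  rcases h with rfl | rfl | rfl | rfl | rfl | rfl <;> decide

-- length of str.split()'s word list over the blanked string = natGroups
lemma go_length (l : List Char) : ∀ (cur : List Char) (acc : List (List Char)),
    (PySem.Chars.split₀.go (l.map (fun c => if bIsV c then c else ' ')) cur acc).length
      = acc.length + (if cur.isEmpty then 0 else 1) + natGroups (!cur.isEmpty) l := by
  induction l with
  | nil =>
      intro cur acc
      cases cur <;> simp [PySem.Chars.split₀.go, natGroups]
  | cons h t ih =>
      intro cur acc
      cases hvb : bIsV h with
      | false =>
          have : PySem.Chars.isspace ' ' = true := by decide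
          cases cur <;>
            simp [PySem.Chars.split₀.go, hvb, this, ih, natGroups]
      | true =>
          have hsp : PySem.Chars.isspace h = false := isspace_of_vowel h hvb
          cases cur <;>
            first
            | (simp [PySem.Chars.split₀.go, hvb, hsp, ih, natGroups]; ring)
            | simp [PySem.Chars.split₀.go, hvb, hsp, ih, natGroups]

-- ===== VERDICT (by name: the statement is the Claim_ definition above) =====
theorem count_syllables_en_spec : Claim_equal_count_syllables_en := by
  intro word _
  unfold Spec_count_syllables_en count_syllables_en count_syllables_en_alt
  cases hw : PySem.Chars.strip (PySem.Chars.lower word.toList) with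
  | nil => simp
  | cons h t =>
      have hfold := foldl_eq_groups (h :: t) 0 false
      have hsplit := go_length (h :: t) [] []
      simp only [PySem.Chars.split₀]
      simp at hfold hsplit
      simp [hfold, hsplit]
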